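-- pv_equiv track=rewrite | github.com/heejun32/Algorithm | 5_Full_Search/0_Eaxm.py | solution
-- ===== SOURCE A (Python) =====
-- def solution(answers):
--     answer = []
--     supoja1 = [1, 2, 3, 4, 5]
--     supoja2 = [2, 1, 2, 3, 2, 4, 2, 5]
--     supoja3 = [3, 3, 1, 1, 2, 2, 4, 4, 5, 5]
--     supojas_ans_cnt = [0] * 3
--
--     for i in range(len(answers)):
--         if answers[i] == supoja1[i % len(supoja1)]:
--             supojas_ans_cnt[0] += 1
--         if answers[i] == supoja2[i % len(supoja2)]:
--             supojas_ans_cnt[1] += 1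
--         if answers[i] == supoja3[i % len(supoja3)]:
--             supojas_ans_cnt[2] += 1
--
--     max_ans_cnt = max(supojas_ans_cnt)
--     for i in range(len(supojas_ans_cnt)):
--         if max_ans_cnt == supojas_ans_cnt[i]:
--             answer.append(i + 1)
--     return answer
-- ===== SOURCE B (Python) =====
-- def solution(answers):
--     # Histogram approach: all three patterns repeat with period dividing 40, so an
--     # answer at index i matches pattern p iff p[(i % 40) % len(p)] == answers[i].
--     # One pass builds a histogram keyed by (i % 40, answer value); each pattern's
--     # score is then a 40-term lookup sum, independent of the input length.
--     PERIOD = 40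
--     hist = {}
--     for i, a in enumerate(answers):
--         key = (i % PERIOD, a)
--         hist[key] = hist.get(key, 0) + 1
--     patterns = [[1, 2, 3, 4, 5],
--                 [2, 1, 2, 3, 2, 4, 2, 5],
--                 [3, 3, 1, 1, 2, 2, 4, 4, 5, 5]]
--     scores = [sum(hist.get((r, p[r % len(p)]), 0) for r in range(PERIOD))
--               for p in patterns]
--     best = max(scores)
--     return [k + 1 for k, s in enumerate(scores) if s == best]
-- ===== Notes on version B (the rewrite author's own statement) =====
-- stated objective: alternative
-- what changed: Replaces A's per-index comparison against the three patterns by a bucketing algorithm: one pass builds a histogram keyed by (index mod 40, answer) -- 40 being a common period of all three patterns -- and each pattern's score is then a fixed 40-term histogram lookup sum, so no answer is ever compared with a pattern element.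
import Mathlib
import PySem

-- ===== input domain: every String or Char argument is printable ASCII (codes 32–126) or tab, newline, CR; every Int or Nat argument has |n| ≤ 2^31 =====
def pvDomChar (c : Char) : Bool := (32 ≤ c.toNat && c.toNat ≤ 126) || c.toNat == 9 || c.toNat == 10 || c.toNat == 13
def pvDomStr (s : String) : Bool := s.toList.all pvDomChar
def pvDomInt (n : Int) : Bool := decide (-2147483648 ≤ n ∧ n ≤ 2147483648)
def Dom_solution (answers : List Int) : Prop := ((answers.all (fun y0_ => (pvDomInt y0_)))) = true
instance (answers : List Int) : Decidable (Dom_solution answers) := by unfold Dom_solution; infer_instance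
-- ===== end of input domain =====

-- B replaces A's per-index comparisons against the three patterns by one histogram pass keyed by
-- (index mod 40, answer value) — 40 is a common period of all three patterns — followed by a fixed
-- 40-term lookup sum per pattern (objective: alternative).

-- ===== PORT A =====
-- one fold over range(len(answers)) carrying the three counters of supojas_ans_cnt as a triple;
-- the pyGetD defaults are never reached (all indices are in range)
def solution (answers : List Int) : List Int :=
  let supoja1 : List Int := [1, 2, 3, 4, 5]
  let supoja2 : List Int := [2, 1, 2, 3, 2, 4, 2, 5]
  let supoja3 : List Int := [3, 3, 1, 1, 2, 2, 4, 4, 5, 5]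
  let cnt : Int × Int × Int :=
    (PySem.List.pyRange 0 (PySem.List.len answers) 1).foldl
      (fun c i =>
        (if PySem.List.pyGetD answers i 0 = PySem.List.pyGetD supoja1 (PySem.Int.mod i (PySem.List.len supoja1)) 0 then c.1 + 1 else c.1,
         if PySem.List.pyGetD answers i 0 = PySem.List.pyGetD supoja2 (PySem.Int.mod i (PySem.List.len supoja2)) 0 then c.2.1 + 1 else c.2.1,
         if PySem.List.pyGetD answers i 0 = PySem.List.pyGetD supoja3 (PySem.Int.mod i (PySem.List.len supoja3)) 0 then c.2.2 + 1 else c.2.2)) (0, 0, 0)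
  let cnts : List Int := [cnt.1, cnt.2.1, cnt.2.2]
  let maxc : Int := (PySem.List.max? cnts (fun y => y)).getD 0
  (PySem.List.pyRange 0 3 1).foldl
    (fun acc i => if maxc = PySem.List.pyGetD cnts i 0 then acc ++ [i + 1] else acc) []

-- ===== PORT B =====
-- Source B's histogram loop: hist[(i % 40, a)] = hist.get(key, 0) + 1 over enumerate(answers);
-- each score is the 40-term sum of hist lookups; indexing p[r % len(p)] is always in range
def solution_alt (answers : List Int) : List Int :=
  let hist : PySem.Dict (Int × Int) Int :=
    (PySem.List.enumerate answers 0).foldl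
      (fun d ia =>
        let key : Int × Int := (PySem.Int.mod ia.1 40, ia.2)
        d.insert key (d.getD key 0 + 1)) PySem.Dict.empty
  let patterns : List (List Int) := [[1, 2, 3, 4, 5], [2, 1, 2, 3, 2, 4, 2, 5], [3, 3, 1, 1, 2, 2, 4, 4, 5, 5]]
  let scores : List Int := patterns.map (fun p =>
    ((PySem.List.pyRange 0 40 1).map
      (fun r => hist.getD (r, PySem.List.pyGetD p (PySem.Int.mod r (PySem.List.len p)) 0) 0)).sum)
  let best : Int := (PySem.List.max? scores (fun y => y)).getD 0
  (PySem.List.enumerate scores 0).filterMap (fun ks => if ks.2 = best then some (ks.1 + 1) else none)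

-- ===== PRECONDITION & SPEC =====
def Spec_solution (answers : List Int) (out : List Int) : Prop := out = solution_alt answers
instance (answers : List Int) (out : List Int) : Decidable (Spec_solution answers out) := by unfold Spec_solution; infer_instance

-- ===== CLAIM (what is proved, stated in full; the proofs are below) =====
def Claim_equal_solution : Prop := ∀ (answers : List Int), Dom_solution answers → Spec_solution answers (solution answers)

-- ===== LEMMAS AND PROOFS =====

-- the key B's histogram loop attaches to an enumerate pair
def keyOf (ia : Int × Int) : Int × Int := (PySem.Int.mod ia.1 40, ia.2)

-- the multiset of keys B's histogram counts
def pairsOf (answers : List Int) : List (Int × Int) :=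
  (PySem.List.enumerate answers 0).map keyOf

-- a fold updating three independent counters splits into three folds
theorem foldl_triple_count (P Q R : Int → Prop) [DecidablePred P] [DecidablePred Q] [DecidablePred R]
    (l : List Int) : ∀ init : Int × Int × Int,
    l.foldl (fun c i =>
        (if P i then c.1 + 1 else c.1,
         if Q i then c.2.1 + 1 else c.2.1,
         if R i then c.2.2 + 1 else c.2.2)) init
      = (l.foldl (fun c i => if P i then c + 1 else c) init.1,
         l.foldl (fun c i => if Q i then c + 1 else c) init.2.1,
         l.foldl (fun c i => if R i then c + 1 else c) init.2.2) := by
  induction l with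
  | nil => intro init; rfl
  | cons x t ih => intro init; simp only [List.foldl_cons, ih]

-- B's histogram fold is the counter of the key multiset
theorem hist_eq_counter (answers : List Int) :
    (PySem.List.enumerate answers 0).foldl
      (fun d ia =>
        let key : Int × Int := (PySem.Int.mod ia.1 40, ia.2)
        d.insert key (d.getD key 0 + 1)) PySem.Dict.empty
      = PySem.Dict.counter (pairsOf answers) := by
  unfold pairsOf
  rw [← PySem.Dict.foldl_insert_getD_add_one_eq_counter, List.foldl_map]
  rfl

-- one indicator column of the 40-bucket sum
theorem countP_range_forty (f : Nat → Int) (q : Int × Int) :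
    ((List.range 40).countP (fun (k : Nat) => (((k : Int), f k) == q)) : Int)
      = if 0 ≤ q.1 ∧ q.1 < 40 ∧ q.2 = f q.1.toNat then 1 else 0 := by
  by_cases h : 0 ≤ q.1 ∧ q.1 < 40 ∧ q.2 = f q.1.toNat
  · obtain ⟨h0, h40, hv⟩ := h
    have ht : q.1.toNat < 40 := by omega
    have hpred : ∀ (k : Nat), ((((k : Int), f k)) == q) = (k == q.1.toNat) := by
      intro k
      apply Bool.eq_iff_iff.mpr
      simp only [beq_iff_eq, Prod.ext_iff]
      constructor
      · rintro ⟨h1, _⟩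
        omega
      · intro hk
        have hk' : k = q.1.toNat := by omega
        subst hk'
        exact ⟨by omega, hv.symm⟩
    simp only [hpred]
    rw [if_pos ⟨h0, h40, hv⟩]
    have hc : (List.range 40).countP (fun k => k == q.1.toNat) = List.count q.1.toNat (List.range 40) := by
      simp [List.count]
    rw [hc, List.count_eq_one_of_mem List.nodup_range (List.mem_range.mpr ht)]
    rfl
  · rw [if_neg h]
    have hz : (List.range 40).countP (fun (k : Nat) => (((k : Int), f k) == q)) = 0 := by
      rw [List.countP_eq_zero]
      intro k hk
      have hk40 : k < 40 := List.mem_range.mp hk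
      simp only [beq_iff_eq, Prod.ext_iff]
      rintro ⟨h1, h2⟩
      refine h ⟨by omega, by omega, ?_⟩
      rw [← h2]
      congr 1
      omega
    rw [hz]; rfl

-- the 40-bucket sum of counts is one countP over the key multiset
theorem sum_count_buckets (f : Nat → Int) (E : List (Int × Int)) :
    ((List.range 40).map (fun (k : Nat) => (E.count ((k : Int), f k) : Int))).sum
      = (E.countP (fun q => decide (0 ≤ q.1 ∧ q.1 < 40 ∧ q.2 = f q.1.toNat)) : Int) := by
  induction E with
  | nil => simp
  | cons q E' ih =>
      have hcnt : ∀ k : Nat, ((q :: E').count ((k : Int), f k) : Int)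
          = (E'.count ((k : Int), f k) : Int) + (if ((k : Int), f k) == q then (1 : Int) else 0) := by
        intro k
        rw [List.count_cons]
        push_cast
        congr 1
        · split_ifs with h1 h2 h2 <;> simp_all [BEq.comm]
      simp only [hcnt]
      rw [PySem.List.sum_map_add_int, ih, PySem.List.sum_map_ite_one_zero, countP_range_forty]
      rw [List.countP_cons]
      push_cast
      congr 1
      split_ifs with h1 h2 h2 <;> simp_all

-- the pattern value an index k is compared with
def fPat (p : List Int) (k : Nat) : Int := p.getD (k % p.length) 0

-- A's per-pattern fold is a countP over the index range
theorem cntA_eq (answers p : List Int) :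
    (PySem.List.pyRange 0 (PySem.List.len answers) 1).foldl
      (fun c i => if PySem.List.pyGetD answers i 0 = PySem.List.pyGetD p (PySem.Int.mod i (PySem.List.len p)) 0 then c + 1 else c) 0
    = ((List.range answers.length).countP
        (fun k => decide (answers.getD k 0 = fPat p k)) : Int) := by
  rw [PySem.List.len_eq answers, PySem.List.pyRange_zero_natCast, List.foldl_map,
    PySem.List.foldl_ite_add_one]
  rw [zero_add]
  congr 1
  apply List.countP_congr
  intro k _
  simp only [PySem.List.len_eq, PySem.Int.mod_natCast, PySem.List.pyGetD_natCast, fPat]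
  exact Iff.rfl

-- B's key multiset countP is the same countP over the index range
theorem pairs_countP (answers p : List Int) (hp : p.length ∣ 40) :
    ((pairsOf answers).countP (fun q => decide (0 ≤ q.1 ∧ q.1 < 40 ∧ q.2 = fPat p q.1.toNat)))
    = (List.range answers.length).countP (fun k => decide (answers.getD k 0 = fPat p k)) := by
  unfold pairsOf keyOf
  rw [List.countP_map, PySem.List.enumerate_eq_map_pyRange answers 0, List.countP_map,
    PySem.List.len_eq answers, PySem.List.pyRange_zero_natCast, List.countP_map]
  apply List.countP_congr
  intro k hk
  have hm : k % 40 < 40 := Nat.mod_lt _ (by norm_num)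
  simp only [Function.comp, show (40 : Int) = ((40 : Nat) : Int) from by norm_num,
    PySem.Int.mod_natCast, PySem.List.pyGetD_natCast]
  simp only [decide_eq_true_eq]
  constructor
  · rintro ⟨_, _, hv⟩
    rw [hv]
    unfold fPat
    congr 1
    rw [Int.toNat_natCast]
    exact Nat.mod_mod_of_dvd k hp
  · intro hv
    refine ⟨by positivity, by exact_mod_cast hm, ?_⟩
    rw [hv]
    unfold fPat
    congr 1
    rw [Int.toNat_natCast]
    exact (Nat.mod_mod_of_dvd k hp).symm

-- A's per-pattern fold equals B's 40-bucket histogram sum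
theorem pattern_eq (answers p : List Int) (hp : p.length ∣ 40) :
    (PySem.List.pyRange 0 (PySem.List.len answers) 1).foldl
      (fun c i => if PySem.List.pyGetD answers i 0 = PySem.List.pyGetD p (PySem.Int.mod i (PySem.List.len p)) 0 then c + 1 else c) 0
    = ((PySem.List.pyRange 0 40 1).map
        (fun r => (PySem.Dict.counter (pairsOf answers)).getD (r, PySem.List.pyGetD p (PySem.Int.mod r (PySem.List.len p)) 0) 0)).sum := by
  rw [show (40 : Int) = ((40 : Nat) : Int) by norm_num, PySem.List.pyRange_zero_natCast,
    List.map_map]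
  have hfun : ∀ k ∈ List.range 40,
      ((fun r => (PySem.Dict.counter (pairsOf answers)).getD (r, PySem.List.pyGetD p (PySem.Int.mod r (PySem.List.len p)) 0) 0) ∘ fun (k : Nat) => ((k : Int))) k
      = ((pairsOf answers).count ((k : Int), fPat p k) : Int) := by
    intro k _
    simp only [Function.comp, PySem.List.len_eq, PySem.Int.mod_natCast,
      PySem.List.pyGetD_natCast, PySem.Dict.getD_counter]
    rfl
  rw [List.map_congr_left hfun, sum_count_buckets (fPat p) (pairsOf answers),
    pairs_countP answers p hp, cntA_eq]

-- the common tail: pick all argmax positions (+1) out of three scores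
theorem tail_eq (a b c : Int) :
    (PySem.List.pyRange 0 3 1).foldl
        (fun acc i => if (PySem.List.max? [a, b, c] (fun y => y)).getD 0 = PySem.List.pyGetD [a, b, c] i 0 then acc ++ [i + 1] else acc) []
      = (PySem.List.enumerate [a, b, c] 0).filterMap
          (fun ks => if ks.2 = (PySem.List.max? [a, b, c] (fun y => y)).getD 0 then some (ks.1 + 1) else none) := by
  have hr : PySem.List.pyRange 0 3 1 = [0, 1, 2] := by decide
  have g0 : PySem.List.pyGetD [a, b, c] 0 0 = a := by
    simp [PySem.List.pyGetD, PySem.List.pyGet?, PySem.List.pyIdx?]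
  have g1 : PySem.List.pyGetD [a, b, c] 1 0 = b := by
    simp [PySem.List.pyGetD, PySem.List.pyGet?, PySem.List.pyIdx?]
  have g2 : PySem.List.pyGetD [a, b, c] 2 0 = c := by
    simp [PySem.List.pyGetD, PySem.List.pyGet?, PySem.List.pyIdx?]
  rw [hr]
  simp only [List.foldl_cons, List.foldl_nil, PySem.List.enumerate_cons, PySem.List.enumerate_nil,
    List.filterMap_cons, List.filterMap_nil, g0, g1, g2]
  generalize (PySem.List.max? [a, b, c] (fun y => y)).getD 0 = m
  by_cases h1 : a = m <;> by_cases h2 : b = m <;> by_cases h3 : c = m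
  · simp [h1, h2, h3]
  · simp [h1, h2, h3, Ne.symm h3]
  · simp [h1, h2, Ne.symm h2, h3]
  · simp [h1, h2, Ne.symm h2, h3, Ne.symm h3]
  · simp [h1, Ne.symm h1, h2, h3]
  · simp [h1, Ne.symm h1, h2, h3, Ne.symm h3]
  · simp [h1, Ne.symm h1, h2, Ne.symm h2, h3]
  · simp [h1, Ne.symm h1, h2, Ne.symm h2, h3, Ne.symm h3]

-- ===== VERDICT (by name: the statement is the Claim_ definition above) =====
theorem solution_spec : Claim_equal_solution := by
  intro answers _
  unfold Spec_solution solution solution_alt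
  simp only []
  rw [foldl_triple_count]
  simp only []
  rw [hist_eq_counter]
  rw [pattern_eq answers [1, 2, 3, 4, 5] (by decide),
    pattern_eq answers [2, 1, 2, 3, 2, 4, 2, 5] (by decide),
    pattern_eq answers [3, 3, 1, 1, 2, 2, 4, 4, 5, 5] (by decide)]
  simp only [List.map]
  exact tail_eq _ _ _
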